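-- pv_equiv track=rewrite | github.com/Audition-Tolosane/Duelo | backend/services/bots.py | _is_active_now
-- ===== SOURCE A (Python) =====
-- def _is_active_now(preferred_hours: list, utc_hour: int) -> bool:
--     """
--     Vérifie si utc_hour tombe dans l'une des plages preferred_hours (UTC).
--     Format plage : "HH:MM-HH:MM" (ex: "20:00-23:00", "00:00-02:00").
--     """
--     for window in (preferred_hours or []):
--         try:
--             start_str, end_str = window.split("-")
--             start_h = int(start_str.split(":")[0])
--             end_h   = int(end_str.split(":")[0])
--             if start_h <= end_h:
--                 if start_h <= utc_hour < end_h: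
--                     return True
--             else:
--                 # Chevauchement minuit ex: "23:00-01:00"
--                 if utc_hour >= start_h or utc_hour < end_h:
--                     return True
--         except Exception:
--             continue
--     return False
-- ===== SOURCE B (Python) =====
-- def _is_active_now(preferred_hours: list, utc_hour: int) -> bool:
--     # Build a table of half-open hour intervals (None = unbounded side),
--     # then answer with a single membership scan over the table.
--     intervals = []
--     for window in (preferred_hours or []):
--         try:
--             start_str, end_str = window.split("-")
--             start_h = int(start_str.split(":")[0])
--             end_h = int(end_str.split(":")[0])
--         except Exception:
--             continue
--         if start_h <= end_h:
--             intervals.append((start_h, end_h))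
--         else:
--             # midnight wrap: [start_h, +inf) and (-inf, end_h)
--             intervals.append((start_h, None))
--             intervals.append((None, end_h))
--     return any((lo is None or lo <= utc_hour) and (hi is None or utc_hour < hi)
--                for lo, hi in intervals)
-- ===== Notes on version B (the rewrite author's own statement) =====
-- stated objective: alternative
-- what changed: B builds a table of half-open hour intervals (unbounded sides for midnight wrap) from the parseable windows and finishes with a single membership scan, instead of A's per-window comparison with early return.
import Mathlib
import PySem

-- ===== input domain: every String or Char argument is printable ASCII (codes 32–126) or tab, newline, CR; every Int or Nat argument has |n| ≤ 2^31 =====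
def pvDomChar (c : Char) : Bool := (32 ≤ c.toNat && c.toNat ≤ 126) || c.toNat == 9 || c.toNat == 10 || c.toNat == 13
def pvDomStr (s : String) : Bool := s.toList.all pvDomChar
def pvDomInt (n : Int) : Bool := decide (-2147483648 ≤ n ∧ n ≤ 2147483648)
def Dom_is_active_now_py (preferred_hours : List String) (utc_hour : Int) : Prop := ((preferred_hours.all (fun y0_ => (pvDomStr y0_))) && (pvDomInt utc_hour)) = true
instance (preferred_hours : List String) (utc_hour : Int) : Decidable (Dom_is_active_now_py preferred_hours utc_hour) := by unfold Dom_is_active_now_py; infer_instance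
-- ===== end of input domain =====

-- B replaces A's per-window compare-and-early-return by building a table of
-- half-open hour intervals and finishing with one membership scan (objective: alternative).

-- shared parsing of one "HH:MM-HH:MM" window; none = any exception A's try/except would catch
def pvParse? (w : String) : Option (Int × Int) :=
  match PySem.Str.split? w "-" with
  | some [sstr, estr] =>
    match PySem.Int.ofStr? (((PySem.Str.split? sstr ":").getD [""]).headD ""),
          PySem.Int.ofStr? (((PySem.Str.split? estr ":").getD [""]).headD "") with
    | some a, some b => some (a, b)
    | _, _ => none
  | _ => none

-- ===== PORT A =====
def is_active_now_py (preferred_hours : List String) (utc_hour : Int) : Bool :=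
  match preferred_hours with
  | [] => false
  | w :: ws =>
    match pvParse? w with
    | some (start_h, end_h) =>
      if start_h ≤ end_h then
        if start_h ≤ utc_hour ∧ utc_hour < end_h then true
        else is_active_now_py ws utc_hour
      else
        if utc_hour ≥ start_h ∨ utc_hour < end_h then true
        else is_active_now_py ws utc_hour
    | none => is_active_now_py ws utc_hour

-- ===== PORT B =====
-- the interval table built by B's loop ((lo, hi), none = unbounded side)
def pvIntervals (ws : List String) : List (Option Int × Option Int) :=
  match ws with
  | [] => []
  | w :: rest =>
    match pvParse? w with
    | none => pvIntervals rest
    | some (s, e) =>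
      (if s ≤ e then [(some s, some e)] else [(some s, none), (none, some e)]) ++ pvIntervals rest

def is_active_now_py_alt (preferred_hours : List String) (utc_hour : Int) : Bool :=
  (pvIntervals preferred_hours).any (fun p =>
    (match p.1 with | none => true | some lo => decide (lo ≤ utc_hour)) &&
    (match p.2 with | none => true | some hi => decide (utc_hour < hi)))

-- ===== PRECONDITION & SPEC =====
def Spec_is_active_now_py (preferred_hours : List String) (utc_hour : Int) (out : Bool) : Prop := out = is_active_now_py_alt preferred_hours utc_hour
instance (preferred_hours : List String) (utc_hour : Int) (out : Bool) : Decidable (Spec_is_active_now_py preferred_hours utc_hour out) := by unfold Spec_is_active_now_py; infer_instance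

-- ===== CLAIM (what is proved, stated in full; the proofs are below) =====
def Claim_equal_is_active_now_py : Prop := ∀ (preferred_hours : List String) (utc_hour : Int), Dom_is_active_now_py preferred_hours utc_hour → Spec_is_active_now_py preferred_hours utc_hour (is_active_now_py preferred_hours utc_hour)

-- ===== LEMMAS AND PROOFS =====
theorem is_active_now_eq (ws : List String) (h : Int) :
    is_active_now_py ws h = is_active_now_py_alt ws h := by
  induction ws with
  | nil => rfl
  | cons w rest ih =>
    simp only [is_active_now_py, is_active_now_py_alt, pvIntervals]
    cases hp : pvParse? w with
    | none => simpa [is_active_now_py_alt] using ih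
    | some p =>
      obtain ⟨s, e⟩ := p
      by_cases hse : s ≤ e <;>
        simp [hse, ih, is_active_now_py_alt, Bool.or_comm, Bool.or_left_comm, Bool.or_assoc]

-- ===== VERDICT (by name: the statement is the Claim_ definition above) =====
theorem is_active_now_py_spec : Claim_equal_is_active_now_py := by
  intro ph h _
  unfold Spec_is_active_now_py
  exact is_active_now_eq ph h
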